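-- pv_equiv track=rewrite | github.com/moye-tech/Molin-OS | molib/infra/security/access_control.py | _detect_command_injection
-- ===== SOURCE A (Python) =====
-- def _detect_command_injection(input_str: str) -> bool:
--     """检测命令注入尝试"""
--     command_patterns = [
--         ";", "&&", "||", "|", "&", "$(", "`", ">>", ">", "<",
--         "rm ", "cat ", "ls ", "chmod ", "wget ", "curl "
--     ]
--
--     for pattern in command_patterns:
--         if pattern in input_str:
--             return True
--
--     return False
-- ===== SOURCE B (Python) =====
-- def _detect_command_injection(input_str: str) -> bool:
--     """检测命令注入尝试"""
--     # The multi-character operator patterns "&&", "||", ">>" are absorbed by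
--     # their single-character members "&", "|", ">", so one character-set scan
--     # plus the remaining multi-character word checks decides the same predicate.
--     if any(c in ";&|`><" for c in input_str):
--         return True
--     for word in ("$(", "rm ", "cat ", "ls ", "chmod ", "wget ", "curl "):
--         if word in input_str:
--             return True
--     return False
-- ===== Notes on version B (the rewrite author's own statement) =====
-- stated objective: simpler
-- what changed: A runs one substring scan per pattern over a 16-entry list; B proves the multi-char operators &&, ||, >> redundant (absorbed by their single-char members) and replaces them with one character-set membership scan plus seven remaining word checks.
import Mathlib
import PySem

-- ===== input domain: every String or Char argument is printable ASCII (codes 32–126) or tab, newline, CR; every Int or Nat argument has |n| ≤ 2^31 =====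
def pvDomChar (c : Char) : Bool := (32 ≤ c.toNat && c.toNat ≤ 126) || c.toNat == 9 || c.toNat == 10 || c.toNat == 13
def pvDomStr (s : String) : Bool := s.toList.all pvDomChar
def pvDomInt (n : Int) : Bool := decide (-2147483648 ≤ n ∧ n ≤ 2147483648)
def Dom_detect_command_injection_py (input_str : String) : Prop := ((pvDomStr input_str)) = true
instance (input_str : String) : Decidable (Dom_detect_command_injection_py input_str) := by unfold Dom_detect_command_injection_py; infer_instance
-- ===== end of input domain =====

-- B replaces A's per-pattern substring scans by a single character-set scan plus the
-- remaining multi-character word checks, using that "&&","||",">>" are absorbed by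
-- "&","|",">" (objective: simpler).


-- ===== PORT A =====
-- the literal 16-entry pattern list of A
def pvPatterns : List String :=
  [";", "&&", "||", "|", "&", "$(", "`", ">>", ">", "<",
   "rm ", "cat ", "ls ", "chmod ", "wget ", "curl "]

-- A: for pattern in command_patterns: if pattern in input_str: return True; return False
def detect_command_injection_py (input_str : String) : Bool :=
  pvPatterns.any (fun pattern => PySem.Str.isIn pattern input_str)

-- ===== PORT B =====
-- the character set ";&|`><" of B's first scan
def pvOpChars : List Char := [';', '&', '|', '`', '>', '<']
-- the remaining multi-character words of B's second loop
def pvWords : List String := ["$(", "rm ", "cat ", "ls ", "chmod ", "wget ", "curl "]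

-- B: if any(c in ";&|`><" for c in input_str): return True
--    for word in (…): if word in input_str: return True
--    return False
def detect_command_injection_py_alt (input_str : String) : Bool :=
  if input_str.toList.any (fun c => pvOpChars.contains c) then true
  else pvWords.any (fun word => PySem.Str.isIn word input_str)

-- ===== PRECONDITION & SPEC =====
def Spec_detect_command_injection_py (input_str : String) (out : Bool) : Prop := out = detect_command_injection_py_alt input_str
instance (input_str : String) (out : Bool) : Decidable (Spec_detect_command_injection_py input_str out) := by unfold Spec_detect_command_injection_py; infer_instance

-- ===== CLAIM (what is proved, stated in full; the proofs are below) =====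
def Claim_equal_detect_command_injection_py : Prop := ∀ (input_str : String), Dom_detect_command_injection_py input_str → Spec_detect_command_injection_py input_str (detect_command_injection_py input_str)

-- ===== LEMMAS AND PROOFS =====

-- a single character is a substring iff it is a member
theorem singleton_infix_iff {c : Char} {l : List Char} : [c] <:+: l ↔ c ∈ l := by
  constructor
  · intro h; exact h.sublist.mem (by simp)
  · intro h
    obtain ⟨t1, t2, rfl⟩ := List.append_of_mem h
    exact ⟨t1, t2, by simp⟩

-- a substring's member characters are members of the string
theorem mem_of_infix {c : Char} {p l : List Char} (hc : c ∈ p) (h : p <:+: l) : c ∈ l :=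
  h.sublist.mem hc

-- A true ↔ some op-char occurs or some word is a substring (absorption of "&&","||",">>")
theorem pvA_iff (s : String) :
    detect_command_injection_py s = true ↔
      (∃ c ∈ pvOpChars, c ∈ s.toList) ∨ ∃ w ∈ pvWords, PySem.Str.isIn w s = true := by
  simp only [detect_command_injection_py, List.any_eq_true]
  constructor
  · rintro ⟨p, hp, hin⟩
    rw [PySem.Str.isIn_iff_infix] at hin
    fin_cases hp
    · exact Or.inl ⟨';', by decide, singleton_infix_iff.mp hin⟩
    · exact Or.inl ⟨'&', by decide, mem_of_infix (by decide) hin⟩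
    · exact Or.inl ⟨'|', by decide, mem_of_infix (by decide) hin⟩
    · exact Or.inl ⟨'|', by decide, singleton_infix_iff.mp hin⟩
    · exact Or.inl ⟨'&', by decide, singleton_infix_iff.mp hin⟩
    · exact Or.inr ⟨"$(", by decide, (PySem.Str.isIn_iff_infix _ _).mpr hin⟩
    · exact Or.inl ⟨'`', by decide, singleton_infix_iff.mp hin⟩
    · exact Or.inl ⟨'>', by decide, mem_of_infix (by decide) hin⟩
    · exact Or.inl ⟨'>', by decide, singleton_infix_iff.mp hin⟩
    · exact Or.inl ⟨'<', by decide, singleton_infix_iff.mp hin⟩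
    · exact Or.inr ⟨"rm ", by decide, (PySem.Str.isIn_iff_infix _ _).mpr hin⟩
    · exact Or.inr ⟨"cat ", by decide, (PySem.Str.isIn_iff_infix _ _).mpr hin⟩
    · exact Or.inr ⟨"ls ", by decide, (PySem.Str.isIn_iff_infix _ _).mpr hin⟩
    · exact Or.inr ⟨"chmod ", by decide, (PySem.Str.isIn_iff_infix _ _).mpr hin⟩
    · exact Or.inr ⟨"wget ", by decide, (PySem.Str.isIn_iff_infix _ _).mpr hin⟩
    · exact Or.inr ⟨"curl ", by decide, (PySem.Str.isIn_iff_infix _ _).mpr hin⟩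
  · rintro (⟨c, hc, hmem⟩ | ⟨w, hw, hin⟩)
    · have hin : PySem.Str.isIn (String.ofList [c]) s = true := by
        rw [PySem.Str.isIn_iff_infix]
        simpa using singleton_infix_iff.mpr hmem
      fin_cases hc
      · exact ⟨";", by decide, hin⟩
      · exact ⟨"&", by decide, hin⟩
      · exact ⟨"|", by decide, hin⟩
      · exact ⟨"`", by decide, hin⟩
      · exact ⟨">", by decide, hin⟩
      · exact ⟨"<", by decide, hin⟩
    · fin_cases hw
      · exact ⟨"$(", by decide, hin⟩
      · exact ⟨"rm ", by decide, hin⟩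
      · exact ⟨"cat ", by decide, hin⟩
      · exact ⟨"ls ", by decide, hin⟩
      · exact ⟨"chmod ", by decide, hin⟩
      · exact ⟨"wget ", by decide, hin⟩
      · exact ⟨"curl ", by decide, hin⟩

-- B under the same characterisation
theorem pvB_iff (s : String) :
    detect_command_injection_py_alt s = true ↔
      (∃ c ∈ pvOpChars, c ∈ s.toList) ∨ ∃ w ∈ pvWords, PySem.Str.isIn w s = true := by
  simp only [detect_command_injection_py_alt]
  split_ifs with h
  · simp only [List.any_eq_true, List.contains_eq_mem, decide_eq_true_eq] at h
    obtain ⟨c, hc, hmem⟩ := h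
    simp only [true_iff]
    exact Or.inl ⟨c, hmem, hc⟩
  · simp only [List.any_eq_true, List.contains_eq_mem, decide_eq_true_eq, not_exists, not_and] at h
    constructor
    · intro hb
      rw [List.any_eq_true] at hb
      exact Or.inr hb
    · rintro (⟨c, hc, hmem⟩ | hw)
      · exact absurd hc (h c hmem)
      · rw [List.any_eq_true]; exact hw

-- ===== VERDICT (by name: the statement is the Claim_ definition above) =====
theorem detect_command_injection_py_spec : Claim_equal_detect_command_injection_py := by
  intro s _
  unfold Spec_detect_command_injection_py
  rw [Bool.eq_iff_iff, pvA_iff, pvB_iff]
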